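-- pv_equiv track=rewrite | github.com/InesBatista28/FP | TP - P/tp12-soccer/futebol.py | criar_dicionario_paises
-- ===== SOURCE A (Python) =====
-- def criar_dicionario_paises(lista_clubes):
--     dicionario = {}
--     for clube in lista_clubes:
--         pais = clube[2]
--         if pais not in dicionario:
--             dicionario[pais] = []
--         dicionario[pais].append(clube[1])
--     return dicionario
-- ===== SOURCE B (Python) =====
-- def criar_dicionario_paises(lista_clubes):
--     # two-pass: ordered distinct countries first, then gather names per country
--     paises = list(dict.fromkeys(clube[2] for clube in lista_clubes))
--     return {pais: [clube[1] for clube in lista_clubes if clube[2] == pais]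
--             for pais in paises}
-- ===== Notes on version B (the rewrite author's own statement) =====
-- stated objective: alternative
-- what changed: Replaces the single-pass dict accumulation with a two-pass scheme: first an ordered dedup of the countries, then a per-country comprehension collecting the names.
import Mathlib
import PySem

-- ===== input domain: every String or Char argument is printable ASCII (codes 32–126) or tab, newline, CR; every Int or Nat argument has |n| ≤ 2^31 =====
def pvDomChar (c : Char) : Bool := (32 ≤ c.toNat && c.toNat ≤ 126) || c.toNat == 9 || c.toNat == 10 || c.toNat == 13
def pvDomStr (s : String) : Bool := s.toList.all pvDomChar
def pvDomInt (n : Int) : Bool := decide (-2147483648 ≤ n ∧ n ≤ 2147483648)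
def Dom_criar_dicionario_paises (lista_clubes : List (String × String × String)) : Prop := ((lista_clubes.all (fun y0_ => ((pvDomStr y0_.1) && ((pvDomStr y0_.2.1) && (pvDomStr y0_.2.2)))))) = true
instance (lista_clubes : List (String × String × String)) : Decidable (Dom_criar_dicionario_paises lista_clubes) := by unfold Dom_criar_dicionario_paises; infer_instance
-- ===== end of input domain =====

-- B replaces the single-pass dict accumulation with a two-pass scheme (ordered dedup of the countries, then a per-country gathering pass); alternative decomposition, not faster.


-- ===== PORT A =====
-- one loop iteration of A: if pais not in dicionario, set dicionario[pais] = []; then append clube[1]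
def pvStepA (d : PySem.Dict String (List String)) (clube : String × String × String) :
    PySem.Dict String (List String) :=
  let pais := clube.2.2
  let d' := if d.contains pais then d else d.insert pais []
  d'.insert pais (d'.getD pais [] ++ [clube.2.1])

def criar_dicionario_paises (lista_clubes : List (String × String × String)) : List (String × List String) :=
  (lista_clubes.foldl pvStepA PySem.Dict.empty).items

-- ===== PORT B =====
def criar_dicionario_paises_alt (lista_clubes : List (String × String × String)) : List (String × List String) :=
  let paises := PySem.List.dedup (lista_clubes.map (·.2.2))
  paises.map (fun pais => (pais, (lista_clubes.filter (fun clube => clube.2.2 == pais)).map (·.2.1)))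

-- ===== PRECONDITION & SPEC =====
def Spec_criar_dicionario_paises (lista_clubes : List (String × String × String)) (out : List (String × List String)) : Prop := out = criar_dicionario_paises_alt lista_clubes
instance (lista_clubes : List (String × String × String)) (out : List (String × List String)) : Decidable (Spec_criar_dicionario_paises lista_clubes out) := by unfold Spec_criar_dicionario_paises; infer_instance

-- ===== CLAIM (what is proved, stated in full; the proofs are below) =====
def Claim_equal_criar_dicionario_paises : Prop := ∀ (lista_clubes : List (String × String × String)), Dom_criar_dicionario_paises lista_clubes → Spec_criar_dicionario_paises lista_clubes (criar_dicionario_paises lista_clubes)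

-- ===== LEMMAS AND PROOFS =====
theorem pvStepA_eq_modify (d : PySem.Dict String (List String)) (c : String × String × String) :
    pvStepA d c = d.modify c.2.2 [] (· ++ [c.2.1]) := by
  unfold pvStepA PySem.Dict.modify
  by_cases h : d.contains c.2.2
  · simp [h]
  · simp only [h, if_neg, Bool.not_eq_true]
    rw [PySem.Dict.getD_insert_self]
    apply PySem.Dict.ext
    rw [PySem.Dict.items_insert_of_contains _ _ (by simp [PySem.Dict.contains_insert_self]),
        PySem.Dict.items_insert_of_not_contains _ _ (by simpa using h),
        PySem.Dict.items_insert_of_not_contains _ _ (by simpa using h)]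
    rw [List.map_append]
    congr 1
    · conv_rhs => rw [← List.map_id d.items]
      apply List.map_congr_left
      intro p hp
      have : (p.1 == c.2.2) = false := by
        by_contra hb
        simp only [Bool.not_eq_false, beq_iff_eq] at hb
        exact h (List.any_eq_true.mpr ⟨p, hp, by simp [hb]⟩)
      simp [this]
    · simp [PySem.Dict.getD_of_not_contains _ _ (by simpa using h)]

theorem items_eq_keys_map {ν : Type} (d : PySem.Dict String ν) (dflt : ν) (h : d.keys.Nodup) :
    d.items = d.keys.map (fun k => (k, d.getD k dflt)) := by
  simp only [PySem.Dict.keys, List.map_map]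
  conv_lhs => rw [← List.map_id d.items]
  apply List.map_congr_left
  intro p hp
  have := PySem.Dict.getD_of_mem_items d (k := p.1) (v := p.2) (by simpa using hp) h dflt
  simp [Function.comp, this]


theorem main_eq (l : List (String × String × String)) :
    criar_dicionario_paises l = criar_dicionario_paises_alt l := by
  unfold criar_dicionario_paises criar_dicionario_paises_alt
  have hstep : l.foldl pvStepA PySem.Dict.empty
      = l.foldl (fun d c => d.modify c.2.2 [] (· ++ [c.2.1])) PySem.Dict.empty := by
    congr 1
    funext d c
    exact pvStepA_eq_modify d c
  rw [hstep]
  have hnodup : (l.foldl (fun d c => d.modify c.2.2 [] (· ++ [c.2.1])) PySem.Dict.empty).keys.Nodup :=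
    PySem.Dict.nodup_keys_foldl_modify_key l (fun c => c.2.2) [] (fun _ c v => v ++ [c.2.1])
      PySem.Dict.empty (by simp [PySem.Dict.keys_empty])
  rw [items_eq_keys_map _ [] hnodup]
  have hkeys : (l.foldl (fun d c => d.modify c.2.2 [] (· ++ [c.2.1])) PySem.Dict.empty).keys
      = PySem.List.dedup (l.map (·.2.2)) := by
    rw [PySem.Dict.keys_foldl_modify_key l (fun c => c.2.2) [] (fun _ c v => v ++ [c.2.1])]
    rw [PySem.List.dedup_eq_ofList]
    simp [PySem.Dict.keys_empty]
    rfl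
  rw [hkeys]
  apply List.map_congr_left
  intro k _
  have hfold : l.foldl (fun d c => d.modify c.2.2 [] (· ++ [c.2.1])) PySem.Dict.empty
      = (l.map (fun c => (c.2.2, c.2.1))).foldl (fun d p => d.modify p.1 [] (· ++ [p.2])) PySem.Dict.empty := by
    rw [List.foldl_map]
  rw [hfold, PySem.Dict.getD_foldl_modify_append]
  simp only [List.filter_map, List.map_map]
  rfl

-- ===== VERDICT =====
theorem criar_dicionario_paises_spec : Claim_equal_criar_dicionario_paises := by
  intro l _
  unfold Spec_criar_dicionario_paises
  exact main_eq l
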